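-- pv_equiv track=rewrite | github.com/PeopleAndService/AlgorithmStudy | yoongyeong/Programmers/heap/more_hot.py | solution
-- ===== SOURCE A (Python) =====
-- import heapq
--
-- def solution(scoville, K):
--     answer = 0
--     heapq.heapify(scoville)
--     while scoville[0] < K:
--         food = heapq.heappop(scoville) + heapq.heappop(scoville) * 2
--         if len(scoville) == 0 and food < K:
--             return -1
--         heapq.heappush(scoville, food)
--         answer += 1
--     return answer
-- ===== SOURCE B (Python) =====
-- def solution(scoville, K):
--     # Rewrites the sorted snapshot each round (slice off the two smallest,
--     # splice the mix back at its counted position) instead of using a heap;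
--     # does not mutate the argument (A heapifies it in place).
--     xs = sorted(scoville)
--     answer = 0
--     while xs[0] < K:
--         food = xs[0] + xs[1] * 2
--         rest = xs[2:]
--         if not rest and food < K:
--             return -1
--         cut = len([v for v in rest if v <= food])
--         xs = rest[:cut] + [food] + rest[cut:]
--         answer += 1
--     return answer
-- ===== Notes on version B (the rewrite author's own statement) =====
-- stated objective: alternative
-- what changed: Replaces the mutable binary heap with an immutable sorted snapshot rebuilt each round: destructure the two smallest off the front and splice the mix back at a position found by counting the elements below it, instead of heappop/heappush.
import Mathlib
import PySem

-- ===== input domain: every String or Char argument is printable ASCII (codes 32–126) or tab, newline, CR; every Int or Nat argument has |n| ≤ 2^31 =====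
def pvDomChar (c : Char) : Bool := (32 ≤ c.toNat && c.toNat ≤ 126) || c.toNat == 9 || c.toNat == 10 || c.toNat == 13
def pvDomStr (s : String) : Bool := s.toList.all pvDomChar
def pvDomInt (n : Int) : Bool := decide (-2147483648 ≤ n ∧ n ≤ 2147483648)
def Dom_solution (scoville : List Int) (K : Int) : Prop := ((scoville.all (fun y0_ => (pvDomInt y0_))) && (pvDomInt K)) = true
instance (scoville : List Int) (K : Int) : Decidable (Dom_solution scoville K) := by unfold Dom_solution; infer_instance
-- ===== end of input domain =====

-- B drops A's binary heap for an immutable sorted snapshot rewritten each round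
-- (slice off the two smallest, splice the mix back at its counted position);
-- same return value everywhere A returns. A mutates the argument (heapify in
-- place), B does not; the equivalence proved here is about the RETURN value only.

-- ===== PORT A =====
-- heapq.heapify / heappop / heappush are library calls; they are ported by their
-- documented contract: a heap is some permutation of its elements with the minimum
-- at index 0 (`heapifyC`), heappop removes that root and re-establishes the
-- contract, heappush adds an element and re-establishes it. This is exact for
-- `solution`'s return value, which depends only on the heap's multiset and root.
def heapifyC (l : List Int) : List Int :=
  match PySem.List.min? l (fun x => x) with
  | none => []
  | some m => m :: l.erase m

-- the while loop; fuel only makes the recursion structural (scoville.length + 1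
-- always suffices, the heap shrinks by one per iteration); 0-results on the
-- fuel-0 / empty-pop branches are the IndexError paths excluded by Pre_solution
def aLoop : Nat → List Int → Int → Int → Int
  | 0, _, _, _ => 0
  | fuel + 1, h, K, answer =>
    match h with
    | [] => 0                                   -- scoville[0]: IndexError
    | x :: rest =>
      if x < K then
        match heapifyC rest with
        | [] => 0                               -- second heappop: IndexError
        | y :: rest2 =>
          let food := x + y * 2
          if rest2.length = 0 ∧ food < K then (-1 : Int)
          else aLoop fuel (heapifyC (food :: heapifyC rest2)) K (answer + 1)
      else answer

def solution (scoville : List Int) (K : Int) : Int :=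
  aLoop (scoville.length + 1) (heapifyC scoville) K 0

-- ===== PORT B =====
-- B's while loop over the sorted snapshot: the two front patterns are xs[0] and
-- xs[1] (the empty / singleton cases are the IndexError paths excluded by
-- Pre_solution); `cut` counts the elements ≤ food and the splice rest[:cut] +
-- [food] + rest[cut:] is take/drop at cut, exactly as in Source B.
def bLoop : Nat → List Int → Int → Int → Int
  | 0, _, _, _ => 0
  | fuel + 1, xs, K, answer =>
    match xs with
    | a :: b :: rest =>
      if K ≤ a then answer
      else
        let food := a + b * 2
        if rest = [] ∧ food < K then (-1 : Int)
        else
          let cut := (rest.filter (fun v => v ≤ food)).length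
          bLoop fuel (rest.take cut ++ food :: rest.drop cut) K (answer + 1)
    | [a] => if K ≤ a then answer else 0        -- xs[1]: IndexError
    | [] => 0                                   -- xs[0]: IndexError

def solution_alt (scoville : List Int) (K : Int) : Int :=
  bLoop (scoville.length + 1) (PySem.List.sorted scoville (fun x => x)) K 0

-- ===== PRECONDITION & SPEC =====
-- A raises IndexError exactly on the empty list (scoville[0]) and on a singleton
-- whose element is below K (the second heappop); those inputs are excluded.
def Pre_solution (scoville : List Int) (K : Int) : Prop :=
  scoville ≠ [] ∧ (scoville.length = 1 → ∀ x ∈ scoville, K ≤ x)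
instance (scoville : List Int) (K : Int) : Decidable (Pre_solution scoville K) := by
  unfold Pre_solution; infer_instance

def pvWitness_solution : List Int × Int := ([1, 2, 3, 9, 10, 12], 7)

def Spec_solution (scoville : List Int) (K : Int) (out : Int) : Prop := out = solution_alt scoville K
instance (scoville : List Int) (K : Int) (out : Int) : Decidable (Spec_solution scoville K out) := by
  unfold Spec_solution; infer_instance

-- ===== CLAIM (what is proved, stated in full; the proofs are below) =====
def Claim_equal_solution : Prop := ∀ (scoville : List Int) (K : Int), Dom_solution scoville K → Pre_solution scoville K → Spec_solution scoville K (solution scoville K)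

-- ===== LEMMAS AND PROOFS =====

theorem heapifyC_perm (l : List Int) : (heapifyC l).Perm l := by
  unfold heapifyC
  cases hm : PySem.List.min? l (fun x => x) with
  | none => simp [(PySem.List.min?_eq_none_iff _ _).mp hm]
  | some m => exact (List.perm_cons_erase (PySem.List.min?_mem hm)).symm

theorem length_heapifyC (l : List Int) : (heapifyC l).length = l.length :=
  (heapifyC_perm l).length_eq

-- proof-side description of B's splice: ordered insertion
def insSorted (l : List Int) (v : Int) : List Int :=
  match l with
  | [] => [v]
  | x :: t => if x ≤ v then x :: insSorted t v else v :: x :: t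

theorem insSorted_perm (l : List Int) (v : Int) : (insSorted l v).Perm (v :: l) := by
  induction l with
  | nil => simp [insSorted]
  | cons x t ih =>
    unfold insSorted
    split
    · exact (ih.cons x).trans (List.Perm.swap v x t)
    · exact List.Perm.refl _

theorem mem_insSorted {l : List Int} {v y : Int} (h : y ∈ insSorted l v) : y = v ∨ y ∈ l := by
  have := (insSorted_perm l v).mem_iff.mp h
  simpa using this

theorem insSorted_pairwise {l : List Int} (v : Int)
    (h : List.Pairwise (fun a b => a ≤ b) l) :
    List.Pairwise (fun a b => a ≤ b) (insSorted l v) := by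
  induction l with
  | nil => simp [insSorted]
  | cons x t ih =>
    rw [List.pairwise_cons] at h
    unfold insSorted
    split
    · rename_i hxv
      rw [List.pairwise_cons]
      refine ⟨fun y hy => ?_, ih h.2⟩
      rcases mem_insSorted hy with rfl | hyt
      · exact hxv
      · exact h.1 y hyt
    · rename_i hxv
      rw [not_le] at hxv
      rw [List.pairwise_cons]
      refine ⟨fun y hy => ?_, List.pairwise_cons.mpr h⟩
      rcases List.mem_cons.mp hy with rfl | hyt
      · exact le_of_lt hxv
      · exact le_of_lt (lt_of_lt_of_le hxv (h.1 y hyt))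

-- B's count-and-splice on a sorted list IS ordered insertion
theorem splice_eq_insSorted (v : Int) : ∀ (l : List Int),
    List.Pairwise (fun a b => a ≤ b) l →
    l.take ((l.filter (fun x => x ≤ v)).length) ++ v :: l.drop ((l.filter (fun x => x ≤ v)).length)
      = insSorted l v := by
  intro l
  induction l with
  | nil => intro _; simp [insSorted]
  | cons x t ih =>
    intro h
    rw [List.pairwise_cons] at h
    by_cases hxv : x ≤ v
    · simp only [List.filter_cons, hxv, decide_true, if_true, List.length_cons,
        List.take_succ_cons, List.drop_succ_cons, List.cons_append, insSorted]
      rw [ih h.2]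
    · have ht : t.filter (fun x => x ≤ v) = [] := by
        rw [List.filter_eq_nil_iff]
        intro y hy
        have : x ≤ y := h.1 y hy
        simp only [decide_eq_true_eq]
        omega
      simp [hxv, ht, insSorted]

-- sorted(l) starts with the minimum, followed by sorted of the rest
theorem sortP_cons_min {l : List Int} {m : Int}
    (hm : PySem.List.min? l (fun x => x) = some m) :
    PySem.List.sorted l (fun x => x) = m :: PySem.List.sorted (l.erase m) (fun x => x) := by
  apply PySem.List.sorted_id_eq_of_perm_of_pairwise
  · exact ((PySem.List.sorted_perm (l.erase m) (fun x => x) false).cons m).trans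
      (List.perm_cons_erase (PySem.List.min?_mem hm)).symm
  · rw [List.pairwise_cons]
    refine ⟨fun y hy => ?_, PySem.List.sorted_pairwise _ _⟩
    have hy' : y ∈ l.erase m := (PySem.List.sorted_perm (l.erase m) (fun x => x) false).mem_iff.mp hy
    exact PySem.List.min?_isMin hm y (List.mem_of_mem_erase hy')

theorem sortP_insSorted (u : List Int) (v : Int) :
    PySem.List.sorted (v :: u) (fun x => x) = insSorted (PySem.List.sorted u (fun x => x)) v := by
  apply PySem.List.sorted_id_eq_of_perm_of_pairwise
  · exact (insSorted_perm _ v).trans ((PySem.List.sorted_perm u (fun x => x) false).cons v)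
  · exact insSorted_pairwise v (PySem.List.sorted_pairwise _ _)

theorem sortP_perm_congr {u w : List Int} (h : u.Perm w) :
    PySem.List.sorted u (fun x => x) = PySem.List.sorted w (fun x => x) :=
  PySem.List.sorted_eq_sorted_of_perm u w (fun x => x) (fun _ _ h => h) h

theorem min?_ne_none {l : List Int} (h : l ≠ []) :
    ∃ m, PySem.List.min? l (fun x => x) = some m := by
  cases hm : PySem.List.min? l (fun x => x) with
  | none => exact absurd ((PySem.List.min?_eq_none_iff _ _).mp hm) h
  | some m => exact ⟨m, rfl⟩

-- the two loops agree on every state of size ≥ 2 (the only states the loop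
-- re-enters), related by: A holds a heap of multiset t, B holds sorted(t)
theorem main_loop (fuel : Nat) : ∀ (t : List Int) (K answer : Int),
    t.length < fuel → 2 ≤ t.length →
    aLoop fuel (heapifyC t) K answer = bLoop fuel (PySem.List.sorted t (fun x => x)) K answer := by
  induction fuel with
  | zero => intro t K answer h _; omega
  | succ fuel ih =>
    intro t K answer hfuel hlen
    have ht : t ≠ [] := by intro h; simp [h] at hlen
    obtain ⟨m, hm⟩ := min?_ne_none ht
    have hs : PySem.List.sorted t (fun x => x) = m :: PySem.List.sorted (t.erase m) (fun x => x) :=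
      sortP_cons_min hm
    have hrl : (t.erase m).length = t.length - 1 := List.length_erase_of_mem (PySem.List.min?_mem hm)
    set rest := t.erase m with hrest
    have hrne : rest ≠ [] := by
      intro h; rw [h] at hrl; simp at hrl; omega
    obtain ⟨m2, hm2⟩ := min?_ne_none hrne
    have hs2 : PySem.List.sorted rest (fun x => x) = m2 :: PySem.List.sorted (rest.erase m2) (fun x => x) :=
      sortP_cons_min hm2
    have hr2l : (rest.erase m2).length = rest.length - 1 :=
      List.length_erase_of_mem (PySem.List.min?_mem hm2)
    set rest2 := rest.erase m2 with hrest2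
    have hh : heapifyC t = m :: rest := by unfold heapifyC; rw [hm]
    have hh2 : heapifyC rest = m2 :: rest2 := by unfold heapifyC; rw [hm2]
    rw [hh, hs, hs2, aLoop, bLoop]
    by_cases hmK : m < K
    · simp only [if_pos hmK, if_neg (not_le.mpr hmK), hh2]
      have hnil : PySem.List.sorted rest2 (fun x => x) = [] ↔ rest2.length = 0 := by
        rw [PySem.List.sorted_eq_nil_iff, List.length_eq_zero_iff]
      by_cases hstop : rest2.length = 0 ∧ m + m2 * 2 < K
      · rw [if_pos hstop, if_pos ⟨hnil.mpr hstop.1, hstop.2⟩]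
      · have hstop' : ¬ (PySem.List.sorted rest2 (fun x => x) = [] ∧ m + m2 * 2 < K) := by
          intro h; exact hstop ⟨hnil.mp h.1, h.2⟩
        rw [if_neg hstop, if_neg hstop']
        have hsp := splice_eq_insSorted (m + m2 * 2) (PySem.List.sorted rest2 (fun x => x))
          (PySem.List.sorted_pairwise _ _)
        have hsins : insSorted (PySem.List.sorted rest2 (fun x => x)) (m + m2 * 2)
            = PySem.List.sorted ((m + m2 * 2) :: heapifyC rest2) (fun x => x) := by
          rw [← sortP_insSorted]
          exact sortP_perm_congr (((heapifyC_perm rest2).cons _).symm)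
        rw [hsp, hsins]
        by_cases h1 : rest2 = []
        · -- one element left: both loops take one more step and stop (food ≥ K here)
          have hfK : ¬ (m + m2 * 2 < K) := fun h => hstop ⟨by simp [h1], h⟩
          have hemp : heapifyC rest2 = [] := by rw [h1]; rfl
          have hone : heapifyC ((m + m2 * 2) :: heapifyC rest2) = [m + m2 * 2] := by
            rw [hemp]; simp [heapifyC, PySem.List.min?]
          have hsone : PySem.List.sorted ((m + m2 * 2) :: heapifyC rest2) (fun x => x)
              = [m + m2 * 2] := by
            rw [hemp]
            exact PySem.List.sorted_eq_self_of_pairwise _ _ (by simp)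
          rw [hone, hsone]
          cases fuel with
          | zero => omega
          | succ fuel' => rw [aLoop, bLoop]; simp [hfK, not_lt.mp hfK]
        · -- still ≥ 2 elements: apply the induction hypothesis to the new multiset
          have hlen' : ((m + m2 * 2) :: heapifyC rest2).length = t.length - 1 := by
            rw [List.length_cons, length_heapifyC]; omega
          exact ih ((m + m2 * 2) :: heapifyC rest2) K (answer + 1)
            (by omega)
            (by rw [hlen']
                have : 0 < rest2.length := List.length_pos_iff.mpr h1
                omega)
    · simp only [if_neg hmK, if_pos (not_lt.mp hmK)]

-- ===== VERDICT (by name: the statement is the Claim_ definition above) =====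
theorem solution_spec : Claim_equal_solution := by
  intro scoville K _ hpre
  unfold Spec_solution solution solution_alt
  rcases hpre with ⟨hne, hone⟩
  by_cases h2 : 2 ≤ scoville.length
  · exact main_loop (scoville.length + 1) scoville K 0 (by omega) h2
  · -- exactly one element, and it is ≥ K: both loops return 0 immediately
    have h1 : scoville.length = 1 := by
      have : 0 < scoville.length := List.length_pos_iff.mpr hne
      omega
    obtain ⟨x, hx⟩ := List.length_eq_one_iff.mp h1
    subst hx
    have hxK : ¬ x < K := not_lt.mpr (hone rfl x (by simp))
    have hh : heapifyC [x] = [x] := by simp [heapifyC, PySem.List.min?]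
    have hs : PySem.List.sorted [x] (fun x => x) = [x] :=
      PySem.List.sorted_eq_self_of_pairwise _ _ (by simp)
    rw [hh, hs]
    simp [aLoop, bLoop, hxK, not_lt.mp hxK]
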